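-- pv_equiv track=rewrite | github.com/nlp-tlp/MaintKG | src/noisie/model_data.py | parse_abbreviation_full_form
-- ===== SOURCE A (Python) =====
-- from typing import Dict, List, Set, Tuple, Union
--
-- def parse_abbreviation_full_form(
--     input_str: str,
-- ) -> List[Tuple[List[str], Union[List[str], str]]]:
--     """Parse a string containing abbreviations and their full forms, separating them into pairs.
--
--     The input string should contain abbreviations followed by their full forms, with each full form
--     enclosed in square brackets. This function splits the string into parts where each abbreviation is
--     followed by its corresponding full form. Spaces outside square brackets are treated as delimiters,
--     while spaces inside square brackets are kept as part of the full form.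
--
--     Parameters
--     ---------
--     input_str :
--         A string containing abbreviations and their full forms. Each full form must be
--         enclosed in square brackets immediately following its abbreviation.
--         For example: "NASA [National Aeronautics and Space Administration] ESA [European Space Agency]".
--
--     Returns
--     -------
--     list of tuples :
--         A list where each tuple contains an abbreviation and its full form as two elements.
--         If an abbreviation does not have a corresponding full form in the input string,
--         its full form is returned as an empty string.
--
--     Example
--     -------
--     >>> parse_abbreviation_full_form("NASA [National Aeronautics and Space Administration] ESA [European Space Agency]")
--     [('NASA', 'National Aeronautics and Space Administration'), ('ESA', 'European Space Agency')]
--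
--     Note
--     ----
--     - The function assumes that the input string is well-formed according to the described format.
--     - If the input does not strictly follow the format, the output may not accurately reflect the intended
--       abbreviation-full form pairs.
--     """
--     # Split the input string by spaces, keeping content inside square brackets intact
--     parts: List[str] = []
--     buffer: str = ""
--     inside_brackets: bool = False
--     for char in input_str:
--         if char == "[":
--             if buffer:
--                 parts.append(buffer.strip())
--                 buffer = ""
--             inside_brackets = True
--         elif char == "]":
--             inside_brackets = False
--             parts.append(buffer.strip())
--             buffer = ""
--         else:
--             if not inside_brackets or (inside_brackets and char != " "):
--                 buffer += char
--             elif inside_brackets and char == " ":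
--                 buffer += char  # Include spaces inside brackets
--     if buffer:  # Add any remaining part
--         parts.append(buffer.strip())
--
--     abbreviations: List[Tuple[List[str], Union[List[str], str]]] = []
--     for i in range(0, len(parts), 2):
--         abbreviation = parts[i]
--         full_form = parts[i + 1] if (i + 1) < len(parts) else ""
--         abbreviations.append((abbreviation, full_form))
--
--     return abbreviations
-- ===== SOURCE B (Python) =====
-- def parse_abbreviation_full_form(input_str):
--     """Split on brackets in one pass instead of a char-by-char state machine."""
--     parts = []
--     for chunk in input_str.split('['):
--         pieces = chunk.split(']')
--         # a piece terminated by ']' is appended (stripped) even when empty;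
--         # a piece followed by '[' or end-of-string only when non-empty
--         for p in pieces[:-1]:
--             parts.append(p.strip())
--         if pieces[-1]:
--             parts.append(pieces[-1].strip())
--     it = iter(parts)
--     return [(a, next(it, "")) for a in it]
-- ===== Notes on version B (the rewrite author's own statement) =====
-- stated objective: faster
-- what changed: Replaces A's character-by-character bracket state machine with a split-on-'[' pass whose chunks are split again on ']' (']'-terminated pieces always flushed, trailing pieces only when non-empty), and replaces the index loop over range(0,len,2) with an iterator-based pairing comprehension.
import Mathlib
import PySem

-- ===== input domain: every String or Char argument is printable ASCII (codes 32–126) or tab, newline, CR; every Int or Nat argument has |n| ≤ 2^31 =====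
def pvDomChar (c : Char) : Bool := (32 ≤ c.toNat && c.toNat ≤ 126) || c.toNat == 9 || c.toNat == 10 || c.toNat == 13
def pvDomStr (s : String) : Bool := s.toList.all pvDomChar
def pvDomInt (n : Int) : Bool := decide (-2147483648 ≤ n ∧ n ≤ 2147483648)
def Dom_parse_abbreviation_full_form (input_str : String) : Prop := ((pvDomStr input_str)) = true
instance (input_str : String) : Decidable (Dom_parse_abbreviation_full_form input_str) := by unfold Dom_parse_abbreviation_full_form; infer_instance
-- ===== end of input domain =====

-- B replaces A's char-by-char bracket state machine with a split-on-brackets pass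
-- (split on '[', then each chunk on ']') followed by an iterator-style pairing; same
-- return value, measured constant-factor faster (bulk str.split instead of a Python
-- character loop).

-- ===== PORT A =====

-- one step of A's character loop; state = (parts, buffer, inside_brackets)
def pvStepA (st : List (List Char) × List Char × Bool) (c : Char) :
    List (List Char) × List Char × Bool :=
  if c = '[' then
    ((if st.2.1 ≠ [] then st.1 ++ [PySem.Chars.strip st.2.1] else st.1), [], true)
  else if c = ']' then
    (st.1 ++ [PySem.Chars.strip st.2.1], [], false)
  else if (!st.2.2) || (st.2.2 && c != ' ') then
    (st.1, st.2.1 ++ [c], st.2.2)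
  else if st.2.2 && (c == ' ') then
    (st.1, st.2.1 ++ [c], st.2.2)
  else (st.1, st.2.1, st.2.2)  -- unreachable: the two conditions above cover all cases

-- one step of A's pairing loop over range(0, len(parts), 2); every index it reads is
-- in range (0 ≤ i < len, and i+1 is read only under the guard), so pyGetD is exact
def pvStepP (parts : List (List Char)) (acc : List (String × String)) (i : Int) :
    List (String × String) :=
  acc ++ [(String.ofList (PySem.List.pyGetD parts i []),
           if i + 1 < (parts.length : Int) then String.ofList (PySem.List.pyGetD parts (i + 1) []) else "")]

def parse_abbreviation_full_form (input_str : String) : List (String × String) :=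
  let st := input_str.toList.foldl pvStepA ([], [], false)
  let parts := if st.2.1 ≠ [] then st.1 ++ [PySem.Chars.strip st.2.1] else st.1
  (PySem.List.pyRange 0 (parts.length : Int) 2).foldl (pvStepP parts) []

-- ===== PORT B =====

-- Source B's pairing comprehension over the iterator: [(a, next(it, "")) for a in it]
def pvPairUp : List (List Char) → List (String × String)
  | [] => []
  | [a] => [(String.ofList a, "")]
  | a :: b :: rest => (String.ofList a, String.ofList b) :: pvPairUp rest

-- Source B's loop body: pieces = chunk.split(']'); append pieces[:-1] stripped, then
-- pieces[-1] stripped when non-empty (split always returns a non-empty list)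
def pvProcChunk (parts : List (List Char)) (chunk : List Char) : List (List Char) :=
  let pieces := PySem.Chars.splitOn chunk [']']
  let parts := parts ++ (PySem.List.slice pieces none (some (-1))).map PySem.Chars.strip
  if PySem.List.pyGetD pieces (-1) [] ≠ [] then
    parts ++ [PySem.Chars.strip (PySem.List.pyGetD pieces (-1) [])]
  else parts

def parse_abbreviation_full_form_alt (input_str : String) : List (String × String) :=
  pvPairUp ((PySem.Chars.splitOn input_str.toList ['[']).foldl pvProcChunk [])

-- ===== PRECONDITION & SPEC =====
def Spec_parse_abbreviation_full_form (input_str : String) (out : List (String × String)) : Prop := out = parse_abbreviation_full_form_alt input_str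
instance (input_str : String) (out : List (String × String)) : Decidable (Spec_parse_abbreviation_full_form input_str out) := by unfold Spec_parse_abbreviation_full_form; infer_instance

-- ===== CLAIM (what is proved, stated in full; the proofs are below) =====
def Claim_equal_parse_abbreviation_full_form : Prop := ∀ (input_str : String), Dom_parse_abbreviation_full_form input_str → Spec_parse_abbreviation_full_form input_str (parse_abbreviation_full_form input_str)

-- ===== LEMMAS AND PROOFS =====

-- canonical "parts" of the tail cs, given the pending (bracket-free) buffer buf
def pvSpec : List Char → List Char → List (List Char)
  | buf, [] => if buf = [] then [] else [PySem.Chars.strip buf]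
  | buf, c :: cs =>
    if c = '[' then (if buf = [] then [] else [PySem.Chars.strip buf]) ++ pvSpec [] cs
    else if c = ']' then PySem.Chars.strip buf :: pvSpec [] cs
    else pvSpec (buf ++ [c]) cs

-- clean recursive form of a single-character split
def pvSplit1 (c : Char) : List Char → List (List Char)
  | [] => [[]]
  | d :: rest =>
    if d = c then [] :: pvSplit1 c rest
    else match pvSplit1 c rest with
         | [] => [[d]]
         | h :: t => (d :: h) :: t

def pvConsHead (pre : List Char) : List (List Char) → List (List Char)
  | [] => [pre]
  | h :: t => (pre ++ h) :: t

lemma pvSplit1_ne_nil (c : Char) (l : List Char) : pvSplit1 c l ≠ [] := by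
  cases l with
  | nil => simp [pvSplit1]
  | cons d rest =>
    simp only [pvSplit1]
    split_ifs
    · simp
    · cases h : pvSplit1 c rest <;> simp

lemma pvSplit1_cons_ne (c d : Char) (rest : List Char) (h : d ≠ c) :
    pvSplit1 c (d :: rest) = pvConsHead [d] (pvSplit1 c rest) := by
  simp only [pvSplit1, if_neg h]
  cases hr : pvSplit1 c rest <;> simp [pvConsHead]

lemma pvConsHead_consHead (pre q : List Char) (xs : List (List Char)) :
    pvConsHead pre (pvConsHead q xs) = pvConsHead (pre ++ q) xs := by
  cases xs <;> simp [pvConsHead]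

lemma pvConsHead_nil (xs : List (List Char)) (h : xs ≠ []) : pvConsHead [] xs = xs := by
  cases xs with
  | nil => exact absurd rfl h
  | cons h t => simp [pvConsHead]

-- fuel-invariant characterisation of PySem's splitOn.go for a single-character separator
lemma pvGo_eq (c : Char) : ∀ (fuel : Nat) (l cur : List Char) (acc : List (List Char)),
    l.length < fuel →
    PySem.Chars.splitOn.go [c] fuel l cur acc = acc.reverse ++ pvConsHead cur.reverse (pvSplit1 c l) := by
  intro fuel
  induction fuel with
  | zero => intro l cur acc h; omega
  | succ f ih =>
    intro l cur acc h
    cases l with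
    | nil =>
      simp [PySem.Chars.splitOn.go, pvSplit1, pvConsHead]
    | cons d rest =>
      by_cases hdc : c = d
      · subst hdc
        have hpre : List.isPrefixOf [c] (c :: rest) = true := by simp [List.isPrefixOf]
        rw [PySem.Chars.splitOn.go, if_pos hpre]
        simp only [List.length_cons, List.length_nil, List.drop_succ_cons, List.drop_zero]
        rw [ih rest [] (cur.reverse :: acc) (by simpa using Nat.lt_of_succ_lt_succ h)]
        have : pvSplit1 c (c :: rest) = [] :: pvSplit1 c rest := by simp [pvSplit1]
        rw [this]
        cases hr : pvSplit1 c rest with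
        | nil => exact absurd hr (pvSplit1_ne_nil c rest)
        | cons hh tt => simp [pvConsHead]
      · have hpre : List.isPrefixOf [c] (d :: rest) = false := by
          simp [List.isPrefixOf]; exact fun hcd => absurd hcd hdc
        rw [PySem.Chars.splitOn.go, if_neg (by simp [hpre])]
        rw [ih rest (d :: cur) acc (by simpa using Nat.lt_of_succ_lt_succ h)]
        rw [pvSplit1_cons_ne c d rest (fun hh => hdc hh.symm)]
        rw [pvConsHead_consHead]
        simp

lemma pvSplitOn_eq (c : Char) (l : List Char) :
    PySem.Chars.splitOn l [c] = pvSplit1 c l := by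
  unfold PySem.Chars.splitOn
  rw [pvGo_eq c (l.length + 1) l [] [] (by omega)]
  simp [pvConsHead_nil _ (pvSplit1_ne_nil c l)]

lemma pvSplit1_not_mem (c : Char) (l : List Char) (h : c ∉ l) : pvSplit1 c l = [l] := by
  induction l with
  | nil => rfl
  | cons d rest ih =>
    have hd : d ≠ c := fun hh => h (by simp [hh])
    rw [pvSplit1_cons_ne c d rest hd, ih (fun hm => h (List.mem_cons_of_mem d hm))]
    simp [pvConsHead]

lemma pvSplit1_flush (buf rest : List Char) (h : ']' ∉ buf) :
    pvSplit1 ']' (buf ++ ']' :: rest) = buf :: pvSplit1 ']' rest := by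
  induction buf with
  | nil => simp [pvSplit1]
  | cons d t ih =>
    have hd : d ≠ ']' := fun hh => h (by simp [hh])
    have ht : ']' ∉ t := fun hm => h (List.mem_cons_of_mem d hm)
    rw [List.cons_append, pvSplit1_cons_ne ']' d _ hd, ih ht]
    simp [pvConsHead]

lemma pvGetElem_last {α : Type} (a : α) (l : List α) : (a :: l)[l.length] = l.getLast?.getD a := by
  induction l generalizing a with
  | nil => simp
  | cons b t ih => simpa [List.getLast?_cons] using ih b

-- pieces[-1] (pieces is non-empty throughout)
lemma pvPyGetD_neg_one {α : Type} (a : α) (l : List α) (d : α) :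
    PySem.List.pyGetD (a :: l) (-1) d = l.getLast?.getD a := by
  simp [PySem.List.pyGetD, PySem.List.pyGet?, PySem.List.pyIdx?, pvGetElem_last]

-- processing a chunk whose head piece buf is ']'-free: the first ']' flushes buf
lemma pvProcChunk_flush (buf rest : List Char) (h : ']' ∉ buf) (parts : List (List Char)) :
    pvProcChunk parts (buf ++ ']' :: rest) = pvProcChunk (parts ++ [PySem.Chars.strip buf]) rest := by
  simp only [pvProcChunk]
  rw [pvSplitOn_eq, pvSplitOn_eq, pvSplit1_flush buf rest h]
  cases hr : pvSplit1 ']' rest with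
  | nil => exact absurd hr (pvSplit1_ne_nil ']' rest)
  | cons hh tt =>
    rw [PySem.List.slice_to_neg_one, PySem.List.slice_to_neg_one]
    simp only [List.dropLast_cons_of_ne_nil (by simp : hh :: tt ≠ []),
      pvPyGetD_neg_one, List.getLast?_cons, Option.getD_some]
    split_ifs <;> simp

-- a chunk with no ']' at all: one piece, flushed only when non-empty
lemma pvProcChunk_pure (buf : List Char) (h : ']' ∉ buf) (parts : List (List Char)) :
    pvProcChunk parts buf = parts ++ (if buf = [] then [] else [PySem.Chars.strip buf]) := by
  simp only [pvProcChunk]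
  rw [pvSplitOn_eq, pvSplit1_not_mem ']' buf h, PySem.List.slice_to_neg_one]
  simp only [pvPyGetD_neg_one, List.getLast?_nil, Option.getD_none]
  split_ifs with h1 <;> simp_all

-- B's chunk loop computes pvSpec
lemma pvB_fold : ∀ (cs buf : List Char), '[' ∉ buf → ']' ∉ buf → ∀ parts : List (List Char),
    List.foldl pvProcChunk parts (pvConsHead buf (pvSplit1 '[' cs)) = parts ++ pvSpec buf cs := by
  intro cs
  induction cs with
  | nil =>
    intro buf _ hr parts
    simp only [pvSplit1, pvConsHead, List.append_nil, List.foldl_cons, List.foldl_nil]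
    rw [pvProcChunk_pure buf hr]
    simp [pvSpec]
  | cons c cs ih =>
    intro buf hl hr parts
    by_cases hlb : c = '['
    · subst hlb
      have h1 : pvSplit1 '[' ('[' :: cs) = [] :: pvSplit1 '[' cs := by simp [pvSplit1]
      rw [h1]
      simp only [pvConsHead, List.append_nil, List.foldl_cons]
      rw [pvProcChunk_pure buf hr]
      have h2 : pvSplit1 '[' cs = pvConsHead [] (pvSplit1 '[' cs) := by
        rw [pvConsHead_nil _ (pvSplit1_ne_nil '[' cs)]
      rw [h2, ih [] (by simp) (by simp)]
      simp [pvSpec]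
    · by_cases hrb : c = ']'
      · subst hrb
        rw [pvSplit1_cons_ne '[' ']' cs (by decide), pvConsHead_consHead]
        cases hs : pvSplit1 '[' cs with
        | nil => exact absurd hs (pvSplit1_ne_nil '[' cs)
        | cons hh tt =>
          simp only [pvConsHead, List.foldl_cons]
          rw [List.append_assoc, List.singleton_append, pvProcChunk_flush buf hh hr]
          have ih' := ih [] (by simp) (by simp) (parts ++ [PySem.Chars.strip buf])
          rw [hs, pvConsHead_nil _ (by simp), List.foldl_cons] at ih'
          rw [ih']
          simp [pvSpec]
      · rw [pvSplit1_cons_ne '[' c cs hlb, pvConsHead_consHead]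
        rw [ih (buf ++ [c])
          (by intro hmem
              rcases List.mem_append.mp hmem with h2 | h2
              · exact hl h2
              · exact hlb (List.mem_singleton.mp h2).symm)
          (by intro hmem
              rcases List.mem_append.mp hmem with h2 | h2
              · exact hr h2
              · exact hrb (List.mem_singleton.mp h2).symm)]
        have : pvSpec buf (c :: cs) = pvSpec (buf ++ [c]) cs := by
          simp [pvSpec, hlb, hrb]
        rw [this]

-- A's character loop computes pvSpec
lemma pvA_fold : ∀ (cs : List Char) (parts : List (List Char)) (buf : List Char) (ins : Bool),
    (let st := cs.foldl pvStepA (parts, buf, ins)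
     if st.2.1 ≠ [] then st.1 ++ [PySem.Chars.strip st.2.1] else st.1) = parts ++ pvSpec buf cs := by
  intro cs
  induction cs with
  | nil =>
    intro parts buf ins
    by_cases h : buf = [] <;> simp [pvSpec, h]
  | cons c cs ih =>
    intro parts buf ins
    by_cases hlb : c = '['
    · subst hlb
      simp only [List.foldl_cons, pvStepA]
      rw [ih]
      by_cases h : buf = [] <;> simp [pvSpec, h]
    · by_cases hrb : c = ']'
      · subst hrb
        simp only [List.foldl_cons, pvStepA, if_neg (by decide : ']' ≠ '[')]
        rw [ih]
        simp [pvSpec]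
      · have hstep : pvStepA (parts, buf, ins) c = (parts, buf ++ [c], ins) := by
          simp only [pvStepA, if_neg hlb, if_neg hrb]
          by_cases hi : ins
          · by_cases hsp : c = ' ' <;> simp [hi, hsp]
          · simp [hi]
        simp only [List.foldl_cons, hstep]
        rw [ih]
        simp [pvSpec, hlb, hrb]

-- A's index-pairing loop equals B's iterator pairing
lemma pvStepP_shift (a b : List Char) (rest : List (List Char)) (acc : List (String × String)) (k : Nat) :
    pvStepP (a::b::rest) acc ((2*k+2 : Nat) : Int) = pvStepP rest acc ((2*k : Nat) : Int) := by
  unfold pvStepP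
  have h1 : ((2*k+2 : Nat) : Int) + 1 = ((2*k+3 : Nat) : Int) := by push_cast; ring
  have h2 : ((2*k : Nat) : Int) + 1 = ((2*k+1 : Nat) : Int) := by push_cast; ring
  rw [h1, h2]
  simp only [PySem.List.pyGetD_natCast]
  have hg1 : (a::b::rest).getD (2*k+2) [] = rest.getD (2*k) [] := by simp [List.getD]
  have hg2 : (a::b::rest).getD (2*k+3) [] = rest.getD (2*k+1) [] := by simp [List.getD]
  rw [hg1, hg2]
  have hc : (((2*k+3 : Nat) : Int) < ((a::b::rest).length : Int)) ↔ (((2*k+1 : Nat) : Int) < (rest.length : Int)) := by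
    push_cast; simp; omega
  by_cases h : ((2*k+1 : Nat) : Int) < (rest.length : Int)
  · rw [if_pos (hc.mpr h), if_pos h]
  · rw [if_neg (fun hh => h (hc.mp hh)), if_neg h]

lemma pvRange2 (n : Nat) : PySem.List.pyRange 0 (n : Int) 2 = (List.range ((n+1)/2)).map (fun k => ((2*k : Nat) : Int)) := by
  rw [PySem.List.pyRange_of_pos 0 (n:Int) (by norm_num)]
  rcases Nat.eq_zero_or_pos n with h | h
  · subst h; simp
  · rw [if_pos (by exact_mod_cast h)]
    have : ((n:Int) - 0 + 2 - 1) / 2 = (((n+1)/2 : Nat) : Int) := by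
      omega
    rw [this]
    simp only [Int.toNat_natCast]
    apply List.map_congr_left
    intro k _
    push_cast; ring

lemma pvPair_eq : ∀ (parts : List (List Char)) (acc : List (String × String)),
    (PySem.List.pyRange 0 (parts.length : Int) 2).foldl (pvStepP parts) acc = acc ++ pvPairUp parts := by
  intro parts
  induction parts using pvPairUp.induct with
  | case1 =>
    intro acc
    simp [PySem.List.pyRange_of_pos 0 0 (by norm_num : (0:Int) < 2), pvPairUp]
  | case2 a =>
    intro acc
    rw [show (([a] : List (List Char)).length : Int) = ((1:Nat) : Int) by norm_num]
    rw [pvRange2]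
    norm_num
    simp [pvStepP, pvPairUp, PySem.List.pyGetD, PySem.List.pyGet?, PySem.List.pyIdx?]
  | case3 a b rest ih =>
    intro acc
    rw [show ((a::b::rest).length : Int) = ((rest.length + 2 : Nat) : Int) by push_cast [List.length_cons]; ring]
    rw [pvRange2]
    have hm : (rest.length + 2 + 1) / 2 = (rest.length + 1) / 2 + 1 := by omega
    rw [hm, List.range_succ_eq_map]
    simp only [List.map_cons, List.foldl_cons, List.map_map]
    have hfirst : pvStepP (a::b::rest) acc ((2*0 : Nat) : Int) = acc ++ [(String.ofList a, String.ofList b)] := by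
      rw [show ((2*0 : Nat) : Int) = ((0:Nat) : Int) by norm_num]
      unfold pvStepP
      rw [show ((0:Nat):Int) + 1 = ((1:Nat):Int) by norm_num]
      simp only [PySem.List.pyGetD_natCast]
      rw [if_pos (by push_cast [List.length_cons]; omega)]
      simp [List.getD]
    rw [hfirst]
    rw [List.foldl_map]
    have hstep : List.foldl (fun acc k => pvStepP (a::b::rest) acc (((fun k => ((2*k:Nat):Int)) ∘ Nat.succ) k))
        (acc ++ [(String.ofList a, String.ofList b)]) (List.range ((rest.length+1)/2))
        = List.foldl (fun acc k => pvStepP rest acc ((2*k : Nat):Int)) (acc ++ [(String.ofList a, String.ofList b)]) (List.range ((rest.length+1)/2)) := by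
      apply PySem.List.foldl_congr_mem
      intro acc' k _
      have : ((fun k => ((2*k:Nat):Int)) ∘ Nat.succ) k = ((2*k+2 : Nat) : Int) := by
        simp [Function.comp]; ring
      rw [this, pvStepP_shift]
    rw [hstep]
    have ihr := ih (acc ++ [(String.ofList a, String.ofList b)])
    rw [pvRange2, List.foldl_map] at ihr
    rw [ihr]
    simp [pvPairUp]

-- ===== VERDICT (by name: the statement is the Claim_ definition above) =====
theorem parse_abbreviation_full_form_spec : Claim_equal_parse_abbreviation_full_form := by
  intro s _
  unfold Spec_parse_abbreviation_full_form
  simp only [parse_abbreviation_full_form, parse_abbreviation_full_form_alt]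
  rw [pvPair_eq, pvA_fold s.toList [] [] false, pvSplitOn_eq,
    ← pvConsHead_nil (pvSplit1 '[' s.toList) (pvSplit1_ne_nil '[' s.toList),
    pvB_fold s.toList [] (by simp) (by simp)]
  simp
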